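-- pv_equiv track=rewrite | github.com/zfifteen/z_metric | src/sandbox/predictions.py | generate_quadratic_forms
-- ===== SOURCE A (Python) =====
-- import math
--
-- def generate_quadratic_forms(limit):
--     max_p = int(math.sqrt(limit)) + 1
--     candidates = set()
--     for p in range(max_p):
--         p2 = p * p
--         max_q = int(math.sqrt((limit - p2) / 4)) + 1
--         for q in range(max_q):
--             num = p2 + 4 * (q * q)
--             if num > 1 and num <= limit:
--                 candidates.add(num)
--     return sorted(candidates)
-- ===== SOURCE B (Python) =====
-- import math
--
--
-- def generate_quadratic_forms(limit):
--     # Incremental sieve of lazy streams merged through a bucket dictionary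
--     # (like the incremental Sieve of Eratosthenes): stream p yields the values
--     # p*p + 4*q*q for successive q via consecutive odd-multiple increments
--     # (step growing by eight each time); 'pending' maps each stream's next
--     # value to the list of steps that reach it, and a single ascending sweep of
--     # n emits the output already sorted: no set, no sort, no inner q loop.
--     pending = {}
--     for p in range(math.isqrt(limit) + 1):
--         pending[p * p] = [4]
--     result = []
--     for n in range(limit + 1):
--         if n not in pending:
--             continue
--         if n > 1:
--             result.append(n)
--         for step in pending[n]:
--             nxt = n + step
--             if nxt <= limit:
--                 pending[nxt] = pending.get(nxt, []) + [step + 8]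
--     return result
-- ===== Notes on version B (the rewrite author's own statement) =====
-- stated objective: alternative
-- what changed: Replaces A's nested (p,q) enumeration into a set followed by a sort with an incremental sieve of lazy streams: each p contributes the stream of values p*p + 4*q*q for successive q, advanced by odd-multiple increments (step growing by eight each time), the streams are merged through a bucket dictionary keyed by each stream's next value, and one ascending sweep of n emits the output already sorted - no set, no sort, no inner q loop.
import Mathlib
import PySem

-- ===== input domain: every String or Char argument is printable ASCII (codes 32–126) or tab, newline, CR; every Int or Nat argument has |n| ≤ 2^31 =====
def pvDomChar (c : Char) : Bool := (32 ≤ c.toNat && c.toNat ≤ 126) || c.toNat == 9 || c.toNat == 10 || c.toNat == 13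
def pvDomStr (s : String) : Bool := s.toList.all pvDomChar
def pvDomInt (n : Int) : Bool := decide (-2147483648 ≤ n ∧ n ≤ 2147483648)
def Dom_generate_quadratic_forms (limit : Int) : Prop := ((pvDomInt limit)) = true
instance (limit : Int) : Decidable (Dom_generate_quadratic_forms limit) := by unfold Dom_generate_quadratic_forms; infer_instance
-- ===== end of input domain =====

-- B replaces A's enumerate-into-a-set-then-sort with an incremental sieve of lazy streams (one per p,
-- advanced by odd-multiple increments) merged through a bucket dictionary, emitting the output already
-- sorted in one ascending sweep (objective: alternative).
-- On Dom (|limit| ≤ 2^31) Python's int(math.sqrt(m)) and int(math.sqrt((limit-p2)/4)) are exact: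
-- they equal Nat.sqrt m and Nat.sqrt ((limit-p2)/4) (float error is far below the gap to the next
-- integer), which is how port A renders them; B uses math.isqrt directly.

-- ===== PORT A =====
def generate_quadratic_forms (limit : Int) : List Int :=
  let max_p := Nat.sqrt limit.toNat + 1                                -- int(math.sqrt(limit)) + 1
  let candidates : PySem.Set Int :=
    (List.range max_p).foldl (fun cand (p : Nat) =>
      let p2 : Int := (p : Int) * (p : Int)
      let max_q := Nat.sqrt ((limit - p2).toNat / 4) + 1               -- int(math.sqrt((limit-p2)/4)) + 1
      (List.range max_q).foldl (fun cand (q : Nat) =>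
        let num := p2 + 4 * ((q : Int) * (q : Int))
        if num > 1 ∧ num ≤ limit then PySem.Set.add cand num else cand) cand)
      PySem.Set.empty
  PySem.List.sorted candidates (fun x => x) false

-- ===== PORT B =====
def generate_quadratic_forms_alt (limit : Int) : List Int :=
  let pending : PySem.Dict Int (List Int) :=                           -- for p in range(isqrt(limit)+1): pending[p*p] = [4]
    (List.range (Nat.sqrt limit.toNat + 1)).foldl
      (fun pd (p : Nat) => pd.insert ((p : Int) * (p : Int)) [4]) PySem.Dict.empty
  (((PySem.List.pyRange 0 (limit + 1) 1)).foldl                        -- for n in range(limit+1)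
    (fun (st : PySem.Dict Int (List Int) × List Int) n =>
      match st.1.get? n with
      | none => st                                                     -- if n not in pending: continue
      | some steps =>
        let result := if n > 1 then st.2 ++ [n] else st.2              -- if n > 1: result.append(n)
        let pending := steps.foldl (fun pd step =>                     -- for step in pending[n]: …
            if n + step ≤ limit then
              pd.insert (n + step) (pd.getD (n + step) [] ++ [step + 8])
            else pd) st.1
        (pending, result))
    (pending, [])).2

-- ===== PRECONDITION & SPEC =====
-- Pre_ excludes negative limit, where math.sqrt(limit) raises ValueError in A (and math.isqrt in B).
def Pre_generate_quadratic_forms (limit : Int) : Prop := 0 ≤ limit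
instance (limit : Int) : Decidable (Pre_generate_quadratic_forms limit) := by
  unfold Pre_generate_quadratic_forms; infer_instance
def pvWitness_generate_quadratic_forms : Int := 20

def Spec_generate_quadratic_forms (limit : Int) (out : List Int) : Prop := out = generate_quadratic_forms_alt limit
instance (limit : Int) (out : List Int) : Decidable (Spec_generate_quadratic_forms limit out) := by unfold Spec_generate_quadratic_forms; infer_instance

-- ===== CLAIM (what is proved, stated in full; the proofs are below) =====
def Claim_equal_generate_quadratic_forms : Prop := ∀ (limit : Int), Dom_generate_quadratic_forms limit → Pre_generate_quadratic_forms limit → Spec_generate_quadratic_forms limit (generate_quadratic_forms limit)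

-- ===== LEMMAS AND PROOFS =====

-- the flattened stream of p²+4q² values A's nested loops enumerate, in loop order
def qfNums (limit : Int) : List Int :=
  (List.range (Nat.sqrt limit.toNat + 1)).flatMap (fun (p : Nat) =>
    (List.range (Nat.sqrt ((limit - (p : Int) * (p : Int)).toNat / 4) + 1)).map (fun (q : Nat) =>
      (p : Int) * (p : Int) + 4 * ((q : Int) * (q : Int))))

-- nested foldl = foldl over the flattened stream
theorem foldl_flatMap_eq {α β σ : Type} (l : List α) (m : α → List β) (f : σ → β → σ) (init : σ) :
    l.foldl (fun s p => (m p).foldl f s) init = (l.flatMap m).foldl f init := by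
  induction l generalizing init with
  | nil => rfl
  | cons x xs ih => simp [List.flatMap_cons, List.foldl_append, ih]

theorem nested_eq_qfNums {σ : Type} (limit : Int) (f : σ → Int → σ) (init : σ) :
    (List.range (Nat.sqrt limit.toNat + 1)).foldl (fun s (p : Nat) =>
      (List.range (Nat.sqrt ((limit - (p : Int) * (p : Int)).toNat / 4) + 1)).foldl
        (fun s (q : Nat) => f s ((p : Int) * (p : Int) + 4 * ((q : Int) * (q : Int)))) s) init
      = (qfNums limit).foldl f init := by
  unfold qfNums
  rw [← foldl_flatMap_eq]
  apply PySem.List.foldl_congr_mem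
  intro s p _
  rw [List.foldl_map]

-- the values A's guard keeps
def qfKept (limit : Int) : List Int :=
  (qfNums limit).filter (fun v => decide (v > 1 ∧ v ≤ limit))

theorem kept_bounds (limit : Int) (v : Int) (hv : v ∈ qfKept limit) : 1 < v ∧ v ≤ limit := by
  have := List.of_mem_filter hv
  simpa using this

-- "n is representable": n = p² + 4q² for some naturals p, q
def qfVal (p q : Nat) : Int := (p : Int) * (p : Int) + 4 * ((q : Int) * (q : Int))

def QfRep (n : Int) : Prop := ∃ p q : Nat, n = qfVal p q

theorem qfVal_nonneg (p q : Nat) : 0 ≤ qfVal p q := by unfold qfVal; positivity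

theorem qfVal_sq_le (p q : Nat) : (p : Int) * (p : Int) ≤ qfVal p q := by
  unfold qfVal
  have : (0 : Int) ≤ 4 * ((q : Int) * (q : Int)) := by positivity
  linarith

theorem qfVal_strictMono (p : Nat) {q q' : Nat} (h : q' < q) : qfVal p q' < qfVal p q := by
  unfold qfVal
  have hq : q' * q' < q * q := by nlinarith
  have hq' : ((q' * q' : Nat) : Int) < ((q * q : Nat) : Int) := by exact_mod_cast hq
  push_cast at hq'
  linarith

theorem qfVal_inj_p {p p' q : Nat} (h : qfVal p q = qfVal p' q) : p = p' := by
  unfold qfVal at h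
  have h2 : (p : Int) * (p : Int) = (p' : Int) * (p' : Int) := by linarith
  have h3 : (p : Int) = (p' : Int) :=
    (mul_self_inj (by positivity) (by positivity)).mp h2
  exact_mod_cast h3

theorem qfVal_succ (p q : Nat) : qfVal p (q + 1) = qfVal p q + (8 * (q : Int) + 4) := by
  unfold qfVal; push_cast; ring

-- membership in A's kept stream = bounds + representability
theorem mem_qfKept_iff (limit n : Int) :
    n ∈ qfKept limit ↔ (1 < n ∧ n ≤ limit ∧ QfRep n) := by
  unfold qfKept
  rw [List.mem_filter]
  constructor
  · rintro ⟨hmem, hg⟩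
    simp only [decide_eq_true_eq] at hg
    refine ⟨hg.1, hg.2, ?_⟩
    unfold qfNums at hmem
    rw [List.mem_flatMap] at hmem
    obtain ⟨p, _, hp2⟩ := hmem
    rw [List.mem_map] at hp2
    obtain ⟨q, _, rfl⟩ := hp2
    exact ⟨p, q, rfl⟩
  · rintro ⟨h1, hle, p, q, hval⟩
    rw [hval]
    unfold qfVal at hval ⊢
    have hq0 : (0 : Int) ≤ 4 * ((q : Int) * (q : Int)) := by positivity
    have hp0 : (0 : Int) ≤ (p : Int) * (p : Int) := by positivity
    have hp2 : (p : Int) * (p : Int) ≤ limit := by omega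
    refine ⟨?_, by simp only [decide_eq_true_eq]; omega⟩
    unfold qfNums
    rw [List.mem_flatMap]
    refine ⟨p, List.mem_range.mpr ?_, ?_⟩
    · have hn : p * p ≤ limit.toNat := by
        have : ((p * p : Nat) : Int) ≤ limit := by push_cast; exact hp2
        omega
      have := Nat.le_sqrt.mpr hn
      omega
    · rw [List.mem_map]
      refine ⟨q, List.mem_range.mpr ?_, rfl⟩
      have h4 : q * q * 4 ≤ (limit - (p : Int) * (p : Int)).toNat := by
        have : ((q * q * 4 : Nat) : Int) ≤ limit - (p : Int) * (p : Int) := by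
          push_cast; linarith
        omega
      have := Nat.le_sqrt.mpr ((Nat.le_div_iff_mul_le (by norm_num)).mpr h4)
      omega

-- A reduces to sorted(set(qfKept limit))
theorem portA_eq (limit : Int) :
    generate_quadratic_forms limit
      = PySem.List.sorted (PySem.Set.ofList (qfKept limit)) (fun x => x) false := by
  unfold generate_quadratic_forms
  have h := nested_eq_qfNums limit
      (fun (cand : PySem.Set Int) num =>
        if num > 1 ∧ num ≤ limit then PySem.Set.add cand num else cand) PySem.Set.empty
  simp only [] at h ⊢
  rw [h, PySem.List.foldl_ite_eq_foldl_filter]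
  rfl

-- ===== the B-side invariant development =====

-- the loop body of B's sweep
def qfBody (limit : Int) (st : PySem.Dict Int (List Int) × List Int) (n : Int) :
    PySem.Dict Int (List Int) × List Int :=
  match st.1.get? n with
  | none => st
  | some steps =>
    let result := if n > 1 then st.2 ++ [n] else st.2
    let pending := steps.foldl (fun pd step =>
        if n + step ≤ limit then
          pd.insert (n + step) (pd.getD (n + step) [] ++ [step + 8])
        else pd) st.1
    (pending, result)

def qfSeedDict (limit : Int) : PySem.Dict Int (List Int) :=
  (List.range (Nat.sqrt limit.toNat + 1)).foldl
    (fun pd (p : Nat) => pd.insert ((p : Int) * (p : Int)) [4]) PySem.Dict.empty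

-- (v, s) is a pending stream state at sweep position n: the stream of p sits at (p, q), its current
-- value v = p²+4q² is still ≤ limit and ≥ n, and every earlier value of the stream has been passed
def qfP (limit n v s : Int) : Prop :=
  ∃ p q : Nat, (p : Int) * (p : Int) ≤ limit ∧ v = qfVal p q ∧ s = 8 * (q : Int) + 4 ∧
    v ≤ limit ∧ n ≤ v ∧ ∀ q' : Nat, q' < q → qfVal p q' < n

def qfInv (limit n : Int) (d : PySem.Dict Int (List Int)) : Prop :=
  (∀ v s : Int, n ≤ v → (s ∈ d.getD v [] ↔ qfP limit n v s)) ∧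
  (∀ v : Int, n ≤ v → (d.getD v []).Nodup) ∧
  (∀ (v : Int) (l : List Int), d.get? v = some l → l ≠ [])

theorem qfP_self_iff (limit n : Int) (hn : n ≤ limit) :
    (∃ s, qfP limit n n s) ↔ QfRep n := by
  constructor
  · rintro ⟨s, p, q, _, hv, _, _, _, _⟩
    exact ⟨p, q, hv⟩
  · rintro ⟨p, q, hv⟩
    refine ⟨8 * (q : Int) + 4, p, q, ?_, hv, rfl, hn, le_refl n, ?_⟩
    · have := qfVal_sq_le p q
      omega
    · intro q' hq'
      rw [hv]
      exact qfVal_strictMono p hq'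

-- the one-step evolution of the pending predicate
theorem qfP_succ_iff (limit n v s' : Int) (hn : n ≤ limit) (hv : n + 1 ≤ v) :
    qfP limit (n + 1) v s' ↔
      (qfP limit n v s' ∨ ∃ s, qfP limit n n s ∧ n + s ≤ limit ∧ n + s = v ∧ s' = s + 8) := by
  constructor
  · rintro ⟨p, q, hpl, hval, hs, hvl, _, hq⟩
    by_cases hall : ∀ q' : Nat, q' < q → qfVal p q' < n
    · exact Or.inl ⟨p, q, hpl, hval, hs, hvl, by omega, hall⟩
    · push_neg at hall
      obtain ⟨q₀, hq₀lt, hq₀ge⟩ := hall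
      have hq₀n : qfVal p q₀ = n := by
        have := hq q₀ hq₀lt
        omega
      have hqeq : q = q₀ + 1 := by
        by_contra hne
        have hlt : q₀ + 1 < q := by omega
        have h1 := hq (q₀ + 1) hlt
        have h2 := qfVal_strictMono p (show q₀ < q₀ + 1 by omega)
        omega
      subst hqeq
      refine Or.inr ⟨8 * (q₀ : Int) + 4, ⟨p, q₀, hpl, hq₀n.symm, rfl, by omega, by omega, ?_⟩,
        ?_, ?_, by push_cast; omega⟩
      · intro q' hq'
        have := qfVal_strictMono p hq'
        omega
      · have := qfVal_succ p q₀
        omega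
      · have := qfVal_succ p q₀
        omega
  · rintro (⟨p, q, hpl, hval, hs, hvl, _, hq⟩ | ⟨s, ⟨p, q, hpl, hval, hs, hvl, _, hq⟩, hlim, hnv, hs'⟩)
    · refine ⟨p, q, hpl, hval, hs, hvl, hv, ?_⟩
      intro q' hq'
      exact lt_trans (hq q' hq') (by omega)
    · refine ⟨p, q + 1, hpl, ?_, by push_cast; omega, by omega, hv, ?_⟩
      · rw [qfVal_succ]; omega
      · intro q' hq'
        rcases Nat.lt_succ_iff_lt_or_eq.mp hq' with h | h
        · exact lt_of_lt_of_le (hq q' h) (by omega)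
        · subst h; omega

-- get? of the seeding fold: which key holds which list
theorem seed_fold_get? (l : List Nat) (d : PySem.Dict Int (List Int)) (v : Int) :
    (l.foldl (fun pd (p : Nat) => pd.insert ((p : Int) * (p : Int)) [4]) d).get? v
      = if l.any (fun p => v == (p : Int) * (p : Int)) then some [4] else d.get? v := by
  induction l generalizing d with
  | nil => simp
  | cons p l ih =>
    rw [List.foldl_cons, ih, List.any_cons]
    by_cases htail : l.any (fun p' => v == (p' : Int) * (p' : Int)) = true
    · simp [htail]
    · by_cases hp : v = (p : Int) * (p : Int) <;>
        simp [PySem.Dict.get?_insert, htail, hp]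

theorem qfSeed_inv (limit : Int) (h0 : 0 ≤ limit) : qfInv limit 0 (qfSeedDict limit) := by
  have hget : ∀ v : Int, (qfSeedDict limit).get? v
      = if (List.range (Nat.sqrt limit.toNat + 1)).any (fun p => v == (p : Int) * (p : Int))
        then some [4] else none := by
    intro v
    unfold qfSeedDict
    rw [seed_fold_get? _ PySem.Dict.empty v, PySem.Dict.get?_empty]
  have hchar : ∀ v s : Int, s ∈ (qfSeedDict limit).getD v [] ↔ qfP limit 0 v s := by
    intro v s
    rw [PySem.Dict.getD_eq_get?_getD, hget v]
    constructor
    · intro hs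
      split at hs
      · next hex =>
        rw [List.any_eq_true] at hex
        obtain ⟨p, hp, hbeq⟩ := hex
        have hv : v = (p : Int) * (p : Int) := by simpa using hbeq
        simp only [Option.getD_some, List.mem_singleton] at hs
        have hple : p ≤ Nat.sqrt limit.toNat := by
          have := List.mem_range.mp hp; omega
        have hp2 : p * p ≤ limit.toNat := Nat.le_sqrt.mp hple
        have hp2i : (p : Int) * (p : Int) ≤ limit := by
          have : ((p * p : Nat) : Int) ≤ limit := by omega
          push_cast at this; exact this
        refine ⟨p, 0, hp2i, by simp [qfVal, hv], by simp [hs], by rw [hv]; exact hp2i,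
          by rw [hv]; positivity, fun q' h => absurd h (by omega)⟩
      · simp at hs
    · rintro ⟨p, q, hpl, hval, hs, hvl, _, hq⟩
      have hq0 : q = 0 := by
        by_contra hne
        have h1 := hq 0 (Nat.pos_of_ne_zero hne)
        have h2 := qfVal_nonneg p 0
        omega
      subst hq0
      have hv : v = (p : Int) * (p : Int) := by simpa [qfVal] using hval
      have hppn : p * p ≤ limit.toNat := by
        have : ((p * p : Nat) : Int) ≤ limit := by push_cast; exact hpl
        omega
      have hc : (List.range (Nat.sqrt limit.toNat + 1)).any
          (fun p' => v == (p' : Int) * (p' : Int)) = true :=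
        List.any_eq_true.mpr ⟨p, List.mem_range.mpr (by have := Nat.le_sqrt.mpr hppn; omega),
          by simpa using hv⟩
      rw [hc]
      simp only [if_true, Option.getD_some, List.mem_singleton]
      omega
  refine ⟨fun v s _ => hchar v s, ?_, ?_⟩
  · intro v _
    rw [PySem.Dict.getD_eq_get?_getD, hget v]
    split <;> simp
  · intro v l hl
    rw [hget v] at hl
    split at hl
    · simp only [Option.some.injEq] at hl; subst hl; simp
    · exact absurd hl (by simp)

-- getD of the advancing fold: the old bucket plus the freshly advanced steps that land on v
theorem advance_fold_getD (limit n : Int) (steps : List Int) (d : PySem.Dict Int (List Int))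
    (v : Int) :
    (steps.foldl (fun pd step =>
        if n + step ≤ limit then
          pd.insert (n + step) (pd.getD (n + step) [] ++ [step + 8])
        else pd) d).getD v []
      = d.getD v [] ++
        ((steps.filter (fun s => decide (n + s ≤ limit ∧ n + s = v))).map (fun s => s + 8)) := by
  induction steps generalizing d with
  | nil => simp
  | cons s rest ih =>
    rw [List.foldl_cons]
    by_cases hg : n + s ≤ limit
    · rw [if_pos hg, ih]
      by_cases hv : n + s = v
      · have hfc : (s :: rest).filter (fun s' => decide (n + s' ≤ limit ∧ n + s' = v))
            = s :: rest.filter (fun s' => decide (n + s' ≤ limit ∧ n + s' = v)) := by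
          simp [List.filter_cons, hv, hv ▸ hg]
        rw [PySem.Dict.getD_insert, if_pos hv.symm, hv, hfc, List.map_cons,
          List.append_assoc]
        rfl
      · have hfc : (s :: rest).filter (fun s' => decide (n + s' ≤ limit ∧ n + s' = v))
            = rest.filter (fun s' => decide (n + s' ≤ limit ∧ n + s' = v)) := by
          simp [List.filter_cons, hv]
        rw [PySem.Dict.getD_insert, if_neg (fun h => hv h.symm), hfc]
    · have hfc : (s :: rest).filter (fun s' => decide (n + s' ≤ limit ∧ n + s' = v))
          = rest.filter (fun s' => decide (n + s' ≤ limit ∧ n + s' = v)) := by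
        simp [List.filter_cons, hg]
      rw [if_neg hg, ih, hfc]

-- the advancing fold never stores an empty list
theorem advance_fold_ne (limit n : Int) (steps : List Int) (d : PySem.Dict Int (List Int))
    (hne : ∀ (v : Int) (l : List Int), d.get? v = some l → l ≠ []) :
    ∀ (v : Int) (l : List Int),
      (steps.foldl (fun pd step =>
        if n + step ≤ limit then
          pd.insert (n + step) (pd.getD (n + step) [] ++ [step + 8])
        else pd) d).get? v = some l → l ≠ [] := by
  induction steps generalizing d with
  | nil => exact hne
  | cons s rest ih =>
    rw [List.foldl_cons]
    by_cases hg : n + s ≤ limit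
    · rw [if_pos hg]
      apply ih
      intro v l hl
      rw [PySem.Dict.get?_insert] at hl
      split at hl
      · simp only [Option.some.injEq] at hl; subst hl; simp
      · exact hne v l hl
    · rw [if_neg hg]; exact ih d hne

-- one sweep step preserves the invariant and appends exactly the kept value
theorem qfStep (limit n : Int) (d : PySem.Dict Int (List Int)) (res : List Int)
    (hn : n ≤ limit) (hInv : qfInv limit n d) :
    qfInv limit (n + 1) (qfBody limit (d, res) n).1 ∧
      (qfBody limit (d, res) n).2 = res ++ (if n ∈ qfKept limit then [n] else []) := by
  obtain ⟨hmem, hnd, hne⟩ := hInv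
  unfold qfBody
  cases hget : d.get? n with
  | none =>
    have hempty : d.getD n [] = [] := PySem.Dict.getD_of_get?_eq_none d [] hget
    have hnoP : ∀ s, ¬ qfP limit n n s := by
      intro s hs
      have := (hmem n s (le_refl n)).mpr hs
      rw [hempty] at this
      simp at this
    have hnk : n ∉ qfKept limit := by
      intro h
      obtain ⟨h1, h2, hrep⟩ := (mem_qfKept_iff limit n).mp h
      obtain ⟨s, hs⟩ := (qfP_self_iff limit n hn).mpr hrep
      exact hnoP s hs
    simp only [hget]
    refine ⟨⟨?_, fun v hv => hnd v (by omega), hne⟩, by simp [hnk]⟩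
    intro v s hv
    rw [hmem v s (by omega), qfP_succ_iff limit n v s hn hv]
    constructor
    · exact Or.inl
    · rintro (h | ⟨s', hs', _⟩)
      · exact h
      · exact absurd hs' (hnoP s')
  | some steps =>
    have hsteps : steps = d.getD n [] := by
      rw [PySem.Dict.getD_eq_get?_getD, hget]; rfl
    have hstepsP : ∀ s, s ∈ steps ↔ qfP limit n n s := by
      intro s; rw [hsteps]; exact hmem n s (le_refl n)
    have hrep : QfRep n := by
      have hnenil : steps ≠ [] := hne n steps hget
      obtain ⟨s, hs⟩ := List.exists_mem_of_ne_nil steps hnenil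
      exact (qfP_self_iff limit n hn).mp ⟨s, (hstepsP s).mp hs⟩
    have hkept : n ∈ qfKept limit ↔ 1 < n := by
      rw [mem_qfKept_iff]
      exact ⟨fun h => h.1, fun h => ⟨h, hn, hrep⟩⟩
    simp only [hget]
    constructor
    · refine ⟨?_, ?_, advance_fold_ne limit n steps d hne⟩
      · intro v s' hv
        rw [advance_fold_getD, List.mem_append, List.mem_map,
          qfP_succ_iff limit n v s' hn hv]
        constructor
        · rintro (h | ⟨s, hs, rfl⟩)
          · exact Or.inl ((hmem v s' (by omega)).mp h)
          · rw [List.mem_filter] at hs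
            obtain ⟨hsmem, hcond⟩ := hs
            simp only [decide_eq_true_eq] at hcond
            exact Or.inr ⟨s, (hstepsP s).mp hsmem, hcond.1, hcond.2, rfl⟩
        · rintro (h | ⟨s, hPs, hlim, hveq, rfl⟩)
          · exact Or.inl ((hmem v s' (by omega)).mpr h)
          · refine Or.inr ⟨s, ?_, rfl⟩
            rw [List.mem_filter]
            exact ⟨(hstepsP s).mpr hPs, by simp only [decide_eq_true_eq]; exact ⟨hlim, hveq⟩⟩
      · intro v hv
        rw [advance_fold_getD]
        have hold : (d.getD v []).Nodup := hnd v (by omega)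
        have hnewnd : ((steps.filter (fun s => decide (n + s ≤ limit ∧ n + s = v))).map
            (fun s => s + 8)).Nodup := by
          refine List.Nodup.map (fun a b h => by omega) (List.Nodup.filter _ ?_)
          rw [hsteps]; exact hnd n (le_refl n)
        refine List.Nodup.append hold hnewnd ?_
        intro s' hsold hsnew
        rw [List.mem_map] at hsnew
        obtain ⟨s, hsf, rfl⟩ := hsnew
        rw [List.mem_filter] at hsf
        obtain ⟨hsmem, hcond⟩ := hsf
        simp only [decide_eq_true_eq] at hcond
        have hPnn : qfP limit n n s := (hstepsP s).mp hsmem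
        have hPv : qfP limit n v (s + 8) := (hmem v (s + 8) (by omega)).mp hsold
        -- the advanced pair (v, s+8) has previous value exactly n, contradicting qfP at n
        obtain ⟨p, q, hpl, hval, hs8, _, _, hq⟩ := hPv
        obtain ⟨p₀, q₀, hpl₀, hval₀, hs₀, _, _, _⟩ := hPnn
        have hqq : q = q₀ + 1 := by omega
        subst hqq
        have hvv : qfVal p (q₀ + 1) = qfVal p₀ (q₀ + 1) := by
          rw [← hval, hcond.2.symm, hval₀, qfVal_succ]
          omega
        have hpp : p = p₀ := qfVal_inj_p hvv
        subst hpp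
        have := hq q₀ (by omega)
        omega
    · by_cases h1 : n > 1
      · rw [if_pos h1, if_pos (hkept.mpr h1)]
      · rw [if_neg h1, if_neg (fun hk => h1 (hkept.mp hk)), List.append_nil]

-- the sweep over 0..k-1: invariant at k and the accumulated result
theorem qfLoop (limit : Int) (h0 : 0 ≤ limit) :
    ∀ k : Nat, (k : Int) ≤ limit + 1 →
      qfInv limit (k : Int)
        (((PySem.List.pyRange 0 (k : Int) 1).foldl (qfBody limit) (qfSeedDict limit, [])).1) ∧
      ((PySem.List.pyRange 0 (k : Int) 1).foldl (qfBody limit) (qfSeedDict limit, [])).2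
        = (PySem.List.pyRange 0 (k : Int) 1).filter (fun v => decide (v ∈ qfKept limit)) := by
  intro k
  induction k with
  | zero =>
    intro _
    rw [PySem.List.pyRange_one_eq_nil (by norm_num)]
    exact ⟨qfSeed_inv limit h0, rfl⟩
  | succ k ih =>
    intro hk
    have hk' : (k : Int) ≤ limit + 1 := by push_cast at hk ⊢; omega
    have hkl : (k : Int) ≤ limit := by push_cast at hk; omega
    obtain ⟨hInv, hres⟩ := ih hk'
    have hsplit : PySem.List.pyRange 0 ((k + 1 : Nat) : Int) 1
        = PySem.List.pyRange 0 (k : Int) 1 ++ [(k : Int)] := by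
      have : ((k + 1 : Nat) : Int) = (k : Int) + 1 := by push_cast; ring
      rw [this, PySem.List.pyRange_one_succ_right (by positivity)]
    rw [hsplit, List.foldl_append, List.filter_append]
    set st := (PySem.List.pyRange 0 (k : Int) 1).foldl (qfBody limit) (qfSeedDict limit, [])
    have hstep := qfStep limit (k : Int) st.1 st.2 hkl hInv
    simp only [List.foldl_cons, List.foldl_nil] at *
    constructor
    · have : ((k + 1 : Nat) : Int) = (k : Int) + 1 := by push_cast; ring
      rw [this]
      exact hstep.1
    · rw [hstep.2, hres]
      congr 1
      by_cases hkk : (k : Int) ∈ qfKept limit <;> simp [hkk]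

-- B reduces to the ascending filter of 0..limit by membership in qfKept
theorem portB_eq (limit : Int) (h0 : 0 ≤ limit) :
    generate_quadratic_forms_alt limit
      = (PySem.List.pyRange 0 (limit + 1) 1).filter (fun v => decide (v ∈ qfKept limit)) := by
  unfold generate_quadratic_forms_alt
  have hcast : ((limit.toNat + 1 : Nat) : Int) = limit + 1 := by omega
  have h := (qfLoop limit h0 (limit.toNat + 1) (by omega)).2
  rw [hcast] at h
  exact h

theorem generate_quadratic_forms_agree (limit : Int) (h0 : 0 ≤ limit) :
    generate_quadratic_forms limit = generate_quadratic_forms_alt limit := by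
  rw [portA_eq, portB_eq limit h0]
  have hpw : ((PySem.List.pyRange 0 (limit + 1) 1).filter
      (fun n => decide (n ∈ qfKept limit))).Pairwise (fun a b => a < b) :=
    (PySem.List.pairwise_lt_pyRange_one 0 (limit + 1)).filter _
  apply PySem.List.sorted_eq_of_perm_of_pairwise_lt
  · apply (List.perm_ext_iff_of_nodup (hpw.imp (fun h => ne_of_lt h))
        (PySem.Set.nodup_ofList _)).mpr
    intro x
    rw [PySem.Set.mem_ofList]
    simp only [List.mem_filter, PySem.List.mem_pyRange_one, decide_eq_true_eq]
    constructor
    · rintro ⟨_, hx⟩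
      exact hx
    · intro hx
      have hb := kept_bounds limit x hx
      exact ⟨⟨by omega, by omega⟩, hx⟩
  · exact hpw

-- ===== VERDICT (by name: the statement is the Claim_ definition above) =====
theorem generate_quadratic_forms_spec : Claim_equal_generate_quadratic_forms := by
  intro limit _ hpre
  exact generate_quadratic_forms_agree limit hpre
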